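-- pv_equiv track=rewrite | github.com/wseungjin/SLRParser | lexical_analyzer.py | isComparison
-- ===== SOURCE A (Python) =====
-- def isComparison(stack): #11 비교연산자
--   state = 'T0'
--   for i in stack:
--     if (i=='<' or i=='>') and state=='T0':
--       state = 'T1'
--     elif (i=='!' or i=='=') and state == 'T0':
--       state = 'T2'
--     elif i=='a' and state == 'T0':
--       state = 'T3'
--     elif i=='=' and state == 'T1':
--       state = 'T4'
--     elif i=='=' and state == 'T2':
--       state = 'T4'
--     elif i=='n' and state == 'T3':
--       state = 'T5'
--     elif i=='d' and state == 'T5':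
--       state = 'T4'
--     else:
--       state = 'false'
--       break
--
--   if state == 'T1' or state == 'T4':
--     return True
--   else:
--     return False
-- ===== SOURCE B (Python) =====
-- def isComparison(stack):
--   return stack in {'<', '>', '<=', '>=', '!=', '==', 'and'}
-- ===== Notes on version B (the rewrite author's own statement) =====
-- stated objective: simpler
-- what changed: Replaced the character-by-character state machine with a single whole-string membership test against the seven-string language the automaton accepts.
import Mathlib
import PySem

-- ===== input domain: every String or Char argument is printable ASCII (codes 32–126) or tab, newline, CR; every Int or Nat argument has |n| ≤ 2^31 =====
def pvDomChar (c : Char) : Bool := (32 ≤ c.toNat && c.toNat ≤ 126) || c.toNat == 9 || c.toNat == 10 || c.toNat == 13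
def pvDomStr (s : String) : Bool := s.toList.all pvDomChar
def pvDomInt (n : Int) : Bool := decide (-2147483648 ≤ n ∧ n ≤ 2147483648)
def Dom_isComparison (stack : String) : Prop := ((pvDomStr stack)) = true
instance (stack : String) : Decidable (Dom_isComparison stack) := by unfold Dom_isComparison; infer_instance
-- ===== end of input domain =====

-- ===== PORT A =====
-- the for-loop with early break: recursion over the characters carrying the state string;
-- the trailing 'else: state="false"; break' makes the final test return False immediately.
def loopA : List Char → String → Bool
  | [], st => st == "T1" || st == "T4"
  | c :: r, st =>
    if (c == '<' || c == '>') && st == "T0" then loopA r "T1"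
    else if (c == '!' || c == '=') && st == "T0" then loopA r "T2"
    else if c == 'a' && st == "T0" then loopA r "T3"
    else if c == '=' && st == "T1" then loopA r "T4"
    else if c == '=' && st == "T2" then loopA r "T4"
    else if c == 'n' && st == "T3" then loopA r "T5"
    else if c == 'd' && st == "T5" then loopA r "T4"
    else false

def isComparison (stack : String) : Bool := loopA stack.toList "T0"

-- ===== PORT B =====
-- B: whole-string membership in the finite accepted set.
def isComparison_alt (stack : String) : Bool :=
  ["<", ">", "<=", ">=", "!=", "==", "and"].contains stack

-- ===== PRECONDITION & SPEC =====
def Spec_isComparison (stack : String) (out : Bool) : Prop := out = isComparison_alt stack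
instance (stack : String) (out : Bool) : Decidable (Spec_isComparison stack out) := by unfold Spec_isComparison; infer_instance

-- ===== CLAIM (what is proved, stated in full; the proofs are below) =====
def Claim_equal_isComparison : Prop := ∀ (stack : String), Dom_isComparison stack → Spec_isComparison stack (isComparison stack)

-- ===== LEMMAS AND PROOFS =====
theorem loopA_T4 (l : List Char) : loopA l "T4" = decide (l = []) := by
  cases l with
  | nil => simp [loopA]
  | cons c r => simp [loopA]

theorem loopA_T5 (l : List Char) : loopA l "T5" = decide (l = ['d']) := by
  cases l with
  | nil => simp [loopA]
  | cons c r =>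
    by_cases h : c = 'd' <;> simp [loopA, h, loopA_T4]

theorem loopA_T3 (l : List Char) : loopA l "T3" = decide (l = ['n', 'd']) := by
  cases l with
  | nil => simp [loopA]
  | cons c r =>
    by_cases h : c = 'n' <;> simp [loopA, h, loopA_T5]

theorem loopA_T2 (l : List Char) : loopA l "T2" = decide (l = ['=']) := by
  cases l with
  | nil => simp [loopA]
  | cons c r =>
    by_cases h : c = '=' <;> simp [loopA, h, loopA_T4]

theorem loopA_T1 (l : List Char) : loopA l "T1" = decide (l = [] ∨ l = ['=']) := by
  cases l with
  | nil => simp [loopA]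
  | cons c r =>
    by_cases h : c = '=' <;> simp [loopA, h, loopA_T4]

theorem loopA_T0 (l : List Char) :
    loopA l "T0" = decide (l = ['<'] ∨ l = ['>'] ∨ l = ['<', '='] ∨ l = ['>', '=']
      ∨ l = ['!', '='] ∨ l = ['=', '='] ∨ l = ['a', 'n', 'd']) := by
  cases l with
  | nil => simp [loopA]
  | cons c r =>
    by_cases h1 : c = '<'
    · simp [loopA, h1, loopA_T1]
    by_cases h2 : c = '>'
    · simp [loopA, h2, loopA_T1]
    by_cases h3 : c = '!'
    · simp [loopA, h3, loopA_T2]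
    by_cases h4 : c = '='
    · simp [loopA, h4, loopA_T2]
    by_cases h5 : c = 'a'
    · simp [loopA, h5, loopA_T3]
    simp [loopA, h1, h2, h3, h4, h5]

-- ===== VERDICT (by name: the statement is the Claim_ definition above) =====
theorem isComparison_spec : Claim_equal_isComparison := by
  intro stack _
  show isComparison stack = isComparison_alt stack
  simp only [isComparison, isComparison_alt, loopA_T0, List.contains_eq_mem,
    List.mem_cons, List.not_mem_nil, or_false]
  rcases stack with ⟨l⟩
  simp [String.ext_iff]
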